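-- pv_equiv track=rewrite | github.com/luyzim/HubM7 | scripts/comandosOxidized.py | insert_line_by_group
-- ===== SOURCE A (Python) =====
-- def insert_line_by_group(routerdb_text: str, new_line: str, target_group: str) -> str:
--
--     new_line = (new_line or "").strip()
--     if not new_line:
--         raise ValueError("Linha nova está vazia, nada a inserir.")
--
--     lines = routerdb_text.splitlines()
--
--     header_to_find = f"##{target_group}"
--     current_group = None
--     last_idx_same_group = None
--
--     for idx, l in enumerate(lines):
--         stripped = l.strip()
--
--         # Detecta cabeçalho de grupo: linha começando com ##
--         if stripped.startswith("##"):
--             current_group = stripped[2:].strip()  # remove '##' e espaços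
--
--         # Se estamos dentro do grupo alvo, atualiza o último índice
--         if current_group == target_group:
--             last_idx_same_group = idx
--
--     if last_idx_same_group is None:
--         # Grupo ainda não existe no arquivo:
--         # cria o cabeçalho e adiciona a linha no final
--         lines.append(header_to_find)
--         lines.append(new_line)
--     else:
--         # Insere logo após a última linha do bloco do grupo
--         lines.insert(last_idx_same_group + 1, new_line)
--
--     return "\n".join(lines).rstrip("\n") + "\n"
-- ===== SOURCE B (Python) =====
-- def _header_group(line):
--     s = line.strip()
--     if s.startswith("##"):
--         return s[2:].strip()
--     return None
--
--
-- def insert_line_by_group(routerdb_text: str, new_line: str, target_group: str) -> str: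
--     new_line = (new_line or "").strip()
--     if not new_line:
--         raise ValueError("Linha nova está vazia, nada a inserir.")
--
--     lines = routerdb_text.splitlines()
--
--     # index of the LAST header line whose group name equals target_group
--     hdr_idx = None
--     for i, line in enumerate(lines):
--         if _header_group(line) == target_group:
--             hdr_idx = i
--
--     if hdr_idx is None:
--         lines = lines + [f"##{target_group}", new_line]
--     else:
--         # end of that block: the next header line, or end of file
--         end = hdr_idx + 1
--         while end < len(lines) and _header_group(lines[end]) is None:
--             end += 1
--         lines = lines[:end] + [new_line] + lines[end:]
--
--     return "\n".join(lines).rstrip("\n") + "\n"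
-- ===== Notes on version B (the rewrite author's own statement) =====
-- stated objective: alternative
-- what changed: A threads a current-group state through every line while tracking the last in-group line index; B first finds the last matching '##' header, then scans forward from it to the next header (or end) to get the insertion point, with the header rule factored into a helper.
import Mathlib
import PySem

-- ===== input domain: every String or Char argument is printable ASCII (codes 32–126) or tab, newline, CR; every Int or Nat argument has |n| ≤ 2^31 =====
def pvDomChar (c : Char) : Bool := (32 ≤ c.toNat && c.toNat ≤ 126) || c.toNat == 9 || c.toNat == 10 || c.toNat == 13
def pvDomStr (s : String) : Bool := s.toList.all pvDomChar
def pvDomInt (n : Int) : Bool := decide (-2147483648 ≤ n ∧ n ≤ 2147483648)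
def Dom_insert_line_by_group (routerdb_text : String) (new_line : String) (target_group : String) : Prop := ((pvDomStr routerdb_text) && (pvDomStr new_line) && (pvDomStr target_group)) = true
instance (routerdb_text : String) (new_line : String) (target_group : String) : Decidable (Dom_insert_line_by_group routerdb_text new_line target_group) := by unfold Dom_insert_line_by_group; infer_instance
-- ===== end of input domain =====

-- B replaces A's line-by-line current-group state machine by: find the last matching '##' header, then scan
-- forward from it to the next header (or end of file) for the insertion point (same cost; objective: alternative decomposition).

-- hand port of str.rstrip("\n"): drops exactly the trailing '\n' characters (exact; shared by both ports,
-- both Pythons end with the same '"\n".join(lines).rstrip("\n") + "\n"' expression)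
def pyRstripNl (s : String) : String :=
  String.ofList (((s.toList.reverse).dropWhile (fun c => c == '\n')).reverse)
-- ===== PORT A =====
def insert_line_by_group (routerdb_text : String) (new_line : String) (target_group : String) : String :=
  let new_line := PySem.Str.strip new_line   -- (new_line or "").strip(): '"" or s' strips the same either way
  let lines := PySem.Str.splitlines routerdb_text
  let header_to_find := "##" ++ target_group
  let st := (PySem.List.enumerate lines).foldl
    (fun (st : Option String × Option Int) p =>
      let stripped := PySem.Str.strip p.2
      let current_group := if PySem.Str.startswith stripped "##" then some (PySem.Str.strip (PySem.Str.slice stripped (some 2) none)) else st.1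
      let last_idx_same_group := if current_group == some target_group then some p.1 else st.2
      (current_group, last_idx_same_group)) (none, none)
  let lines' := match st.2 with
    | none => lines ++ [header_to_find, new_line]
    | some i => PySem.List.insert lines (i + 1) new_line
  pyRstripNl (PySem.Str.join "\n" lines') ++ "\n"
-- ===== PORT B =====
-- Source B's _header_group
def hdrGroup (line : String) : Option String :=
  let s := PySem.Str.strip line
  if PySem.Str.startswith s "##" then some (PySem.Str.strip (PySem.Str.slice s (some 2) none)) else none
-- Source B's 'while end < len(lines) and _header_group(lines[end]) is None: end += 1'
-- (the guard keeps e in range, so pyGetD with default "" is exact for lines[end])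
def blockEnd (lines : List String) (e : Int) : Int :=
  if h : e < (lines.length : Int) then
    if hdrGroup (PySem.List.pyGetD lines e "") = none then blockEnd lines (e + 1) else e
  else e
termination_by ((lines.length : Int) - e).toNat
decreasing_by omega
def insert_line_by_group_alt (routerdb_text : String) (new_line : String) (target_group : String) : String :=
  let new_line := PySem.Str.strip new_line
  let lines := PySem.Str.splitlines routerdb_text
  let hdr_idx := (PySem.List.enumerate lines).foldl
    (fun (acc : Option Int) p => if hdrGroup p.2 == some target_group then some p.1 else acc) none
  let lines' := match hdr_idx with
    | none => lines ++ ["##" ++ target_group, new_line]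
    | some i =>
        let e := blockEnd lines (i + 1)
        PySem.List.slice lines none (some e) ++ new_line :: PySem.List.slice lines (some e) none
  pyRstripNl (PySem.Str.join "\n" lines') ++ "\n"

-- ===== PRECONDITION & SPEC =====
-- Pre_ excludes exactly the inputs where A raises ValueError: a new_line that strips to empty (B raises there too).
def Pre_insert_line_by_group (routerdb_text : String) (new_line : String) (target_group : String) : Prop :=
  PySem.Str.strip new_line ≠ ""
instance (routerdb_text : String) (new_line : String) (target_group : String) : Decidable (Pre_insert_line_by_group routerdb_text new_line target_group) := by unfold Pre_insert_line_by_group; infer_instance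

def pvWitness_insert_line_by_group : String × String × String := ("##g1\nr1", "r2", "g1")

def Spec_insert_line_by_group (routerdb_text : String) (new_line : String) (target_group : String) (out : String) : Prop := out = insert_line_by_group_alt routerdb_text new_line target_group
instance (routerdb_text : String) (new_line : String) (target_group : String) (out : String) : Decidable (Spec_insert_line_by_group routerdb_text new_line target_group out) := by unfold Spec_insert_line_by_group; infer_instance

-- ===== CLAIM (what is proved, stated in full; the proofs are below) =====
def Claim_equal_insert_line_by_group : Prop := ∀ (routerdb_text : String) (new_line : String) (target_group : String), Dom_insert_line_by_group routerdb_text new_line target_group → Pre_insert_line_by_group routerdb_text new_line target_group → Spec_insert_line_by_group routerdb_text new_line target_group (insert_line_by_group routerdb_text new_line target_group)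

-- ===== LEMMAS AND PROOFS =====
def nH : List String → Nat
  | [] => 0
  | l :: ls => if (hdrGroup l).isSome then 0 else nH ls + 1
def LM (g : String) : List String → Option Nat
  | [] => none
  | l :: ls =>
    match LM g ls with
    | some i => some (i + 1)
    | none => if hdrGroup l == some g then some 0 else none

theorem cg_step (c0 : Option String) (l : String) :
    (if PySem.Str.startswith (PySem.Str.strip l) "##" then some (PySem.Str.strip (PySem.Str.slice (PySem.Str.strip l) (some 2) none)) else c0)
    = match hdrGroup l with | some h => some h | none => c0 := by
  simp only [hdrGroup]
  split_ifs <;> rfl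

theorem nH_le (ls : List String) : nH ls ≤ ls.length := by
  induction ls with
  | nil => simp [nH]
  | cons l ls ih => simp only [nH]; split_ifs <;> simp <;> omega

theorem LM_lt (g : String) (ls : List String) (i : Nat) (h : LM g ls = some i) : i < ls.length := by
  induction ls generalizing i with
  | nil => simp [LM] at h
  | cons l ls ih =>
    simp only [LM] at h
    rcases hlm : LM g ls with _ | j <;> rw [hlm] at h
    · split_ifs at h
      cases h; simp
    · cases h; have := ih j hlm; simp; omega

theorem foldB_eq (g : String) (ls : List String) : ∀ (s : Int) (acc : Option Int),
    (PySem.List.enumerate ls s).foldl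
      (fun (acc : Option Int) p => if hdrGroup p.2 == some g then some p.1 else acc) acc
    = match LM g ls with
      | some i => some (s + i)
      | none => acc := by
  induction ls with
  | nil => intro s acc; simp [PySem.List.enumerate, LM]
  | cons l ls ih =>
    intro s acc
    rw [PySem.List.enumerate_cons]
    simp only [List.foldl_cons]
    rw [ih]
    simp only [LM]
    rcases h : LM g ls with _ | i
    · split_ifs with hm <;> simp
    · push_cast; ring_nf

theorem foldA_eq (g : String) (ls : List String) : ∀ (s : Int) (c0 : Option String) (acc : Option Int),
    ((PySem.List.enumerate ls s).foldl
      (fun (st : Option String × Option Int) p =>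
        let stripped := PySem.Str.strip p.2
        let current_group := if PySem.Str.startswith stripped "##" then some (PySem.Str.strip (PySem.Str.slice stripped (some 2) none)) else st.1
        let last_idx_same_group := if current_group == some g then some p.1 else st.2
        (current_group, last_idx_same_group)) (c0, acc)).2
    = match LM g ls with
      | some i => some (s + i + (nH (ls.drop (i + 1)) : Nat))
      | none => if c0 == some g then (if nH ls = 0 then acc else some (s + (nH ls : Int) - 1)) else acc := by
  induction ls with
  | nil =>
    intro s c0 acc
    simp only [PySem.List.enumerate, List.foldl_nil, LM, nH]
    split_ifs <;> rfl
  | cons l ls ih =>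
    intro s c0 acc
    rw [PySem.List.enumerate_cons]
    simp only [List.foldl_cons]
    rw [ih]
    rw [cg_step c0 l]
    rcases hl : hdrGroup l with _ | h
    · simp only [LM, nH, hl, Option.isSome_none]
      rcases hm : LM g ls with _ | i <;> simp only [hm]
      · simp only [Bool.false_eq_true, if_false]
        split_ifs <;> simp_all <;> push_cast <;> omega
      · simp only [List.drop_succ_cons, Option.some.injEq]
        push_cast; ring
    · simp only [LM, nH, hl, Option.isSome_some, if_true]
      by_cases hg : h = g
      · have hbeq : ((some h == some g) = true) := by simp [hg]
        simp only [hbeq, if_true]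
        rcases hm : LM g ls with _ | i
        · simp only [Nat.cast_zero]
          split_ifs <;> simp_all [List.drop_succ_cons] <;> push_cast <;> omega
        · simp only [List.drop_succ_cons, Option.some.injEq]
          push_cast; ring
      · have hne : ((some h == some g) = false) := by simp [hg]
        simp only [hne, Bool.false_eq_true, if_false]
        rcases hm : LM g ls with _ | i
        · split_ifs <;> rfl
        · simp only [List.drop_succ_cons, Option.some.injEq]
          push_cast; ring

theorem blockEnd_eq (ls : List String) : ∀ (e : Nat), blockEnd ls (e : Int) = ((e + nH (ls.drop e) : Nat) : Int) := by
  suffices H : ∀ (k e : Nat), ls.length - e ≤ k → blockEnd ls (e : Int) = ((e + nH (ls.drop e) : Nat) : Int) by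
    intro e; exact H _ e le_rfl
  intro k
  induction k with
  | zero =>
    intro e he
    have hge : ls.length ≤ e := by omega
    rw [blockEnd, dif_neg (by exact_mod_cast not_lt.mpr hge)]
    rw [List.drop_eq_nil_of_le hge]
    simp [nH]
  | succ k ih =>
    intro e he
    by_cases h : e < ls.length
    · rw [blockEnd, dif_pos (by exact_mod_cast h)]
      rw [PySem.List.pyGetD_natCast, List.getD_eq_getElem ls "" h]
      have hd : ls.drop e = ls[e] :: ls.drop (e + 1) := (List.getElem_cons_drop h).symm
      rw [hd]
      rcases hh : hdrGroup ls[e] with _ | grp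
      · rw [if_pos rfl]
        have : ((e : Int) + 1) = ((e + 1 : Nat) : Int) := by push_cast; ring
        rw [this, ih (e + 1) (by omega)]
        simp only [nH, hh, Option.isSome_none, Bool.false_eq_true, if_false]
        push_cast; ring
      · rw [if_neg (by simp [hh])]
        simp [nH, hh]
    · have hge : ls.length ≤ e := by omega
      rw [blockEnd, dif_neg (by exact_mod_cast not_lt.mpr hge)]
      rw [List.drop_eq_nil_of_le hge]
      simp [nH]

theorem main_eq (r n g : String) : insert_line_by_group r n g = insert_line_by_group_alt r n g := by
  simp only [insert_line_by_group, insert_line_by_group_alt]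
  rw [foldA_eq, foldB_eq]
  rcases hm : LM g (PySem.Str.splitlines r) with _ | i
  · rfl
  · dsimp only
    have hi := LM_lt g (PySem.Str.splitlines r) i hm
    have hnle : nH (List.drop (i + 1) (PySem.Str.splitlines r)) ≤ (PySem.Str.splitlines r).length - (i + 1) := by
      have h2 := nH_le (List.drop (i + 1) (PySem.Str.splitlines r))
      simpa [List.length_drop] using h2
    rw [show ((0 : Int) + ↑i + 1) = ((i + 1 : Nat) : Int) by push_cast; ring]
    rw [blockEnd_eq]
    rw [show ((0 : Int) + ↑i + ↑(nH (List.drop (i + 1) (PySem.Str.splitlines r))) + 1) = ((i + 1 + nH (List.drop (i + 1) (PySem.Str.splitlines r)) : Nat) : Int) by push_cast; ring]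
    rw [PySem.List.insert_natCast _ _ _ (by omega)]
    rw [PySem.List.slice_to _ (by exact Int.natCast_nonneg _)]
    rw [PySem.List.slice_from _ (by exact Int.natCast_nonneg _)]
    simp only [Int.toNat_natCast]

-- ===== VERDICT (by name: the statement is the Claim_ definition above) =====
theorem insert_line_by_group_spec : Claim_equal_insert_line_by_group := by
  intro routerdb_text new_line target_group _ _
  unfold Spec_insert_line_by_group
  exact main_eq routerdb_text new_line target_group
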